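-- pv_equiv track=rewrite | github.com/zpczaizheli/Metabolite | DB_generation.py | del_null
-- ===== SOURCE A (Python) =====
-- def del_null(smi):
--     smi_del_tail = []
--     flag = True
--     for j in range(len(smi) - 1, -1, -1):
--         if smi[j] in Bond_list:
--             flag = False
--         if smi[j] in Atom_list:
--             flag = True
--         if smi[j] != '?':
--             smi_del_tail.append(smi[j])
--         elif smi[j] == '?':
--             if flag == False:
--                 smi_del_tail.append('?')
--     smi_del_tail.reverse()
--
--     num_null = 0
--     smi_del = []
--     for k in smi_del_tail:
--         smi_del.append(k)
--         if k != '?':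
--             num_null = 0
--         if k == '?':
--             num_null = num_null + 1
--         if num_null > 0 and num_null % 5 == 0:
--             smi_del = smi_del[0:len(smi_del) - 5]
--             smi_del.append('?5')
--     return smi_del
--
-- Bond_list = ['-', '=', '#', '~']
--
-- Atom_list = ['C', 'N', 'O', 'S', 'F', 'Si', 'P', 'Cl', 'Br', 'Mg', 'Na', 'Ca', 'Fe', 'Al', 'I', 'B', 'K', 'Se', 'Zn',
--              'H', 'Cu', 'Mn']
-- ===== SOURCE B (Python) =====
-- Bond_list = ['-', '=', '#', '~']
--
-- Atom_list = ['C', 'N', 'O', 'S', 'F', 'Si', 'P', 'Cl', 'Br', 'Mg', 'Na', 'Ca', 'Fe', 'Al', 'I', 'B', 'K', 'Se', 'Zn',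
--              'H', 'Cu', 'Mn']
--
--
-- def del_null(smi):
--     # pass 1: scan right-to-left; a '?' survives only while the nearest
--     # bond/atom token to its right is a bond.  kept is built in reversed order.
--     kept = []
--     flag = True
--     for t in reversed(smi):
--         if t in Bond_list:
--             flag = False
--         elif t in Atom_list:
--             flag = True
--         if t != '?' or not flag:
--             kept.append(t)
--     # pass 2: run-length compression — a maximal run of n '?' becomes
--     # (n // 5) copies of '?5' followed by (n % 5) copies of '?'.
--     out = []
--     run = 0
--     for t in reversed(kept):          # reversed(kept) = original order
--         if t == '?':
--             run += 1
--         else: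
--             out += ['?5'] * (run // 5) + ['?'] * (run % 5)
--             run = 0
--             out.append(t)
--     out += ['?5'] * (run // 5) + ['?'] * (run % 5)
--     return out
-- ===== Notes on version B (the rewrite author's own statement) =====
-- stated objective: alternative
-- what changed: Pass 2's incremental counter with append-then-slice backpatching (smi_del[0:len-5] + ['?5'] each time the counter hits a multiple of 5) is replaced by run-length compression: count each maximal run of '?' and emit run//5 copies of '?5' followed by run%5 copies of '?' with divmod arithmetic; pass 1 folds directly over reversed(smi) instead of an index loop over range(len-1,-1,-1).
import Mathlib
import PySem

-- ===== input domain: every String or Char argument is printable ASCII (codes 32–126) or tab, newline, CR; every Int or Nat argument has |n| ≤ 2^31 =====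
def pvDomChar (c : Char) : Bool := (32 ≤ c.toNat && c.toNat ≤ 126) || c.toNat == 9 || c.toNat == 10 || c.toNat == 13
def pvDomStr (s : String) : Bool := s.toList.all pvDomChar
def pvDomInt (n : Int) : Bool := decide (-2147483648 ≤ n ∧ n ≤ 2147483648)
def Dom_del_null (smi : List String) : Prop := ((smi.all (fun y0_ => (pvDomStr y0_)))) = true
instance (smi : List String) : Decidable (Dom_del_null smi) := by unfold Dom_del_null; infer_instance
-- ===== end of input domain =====

-- B replaces A's incremental counter-and-slice compression of '?' runs by a
-- run-length pass (each maximal run of n '?' becomes n/5 copies of "?5" then n%5 "?"): alternative decomposition, no speed claim.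

-- ===== PORT A =====
def Bond_list : List String := ["-", "=", "#", "~"]

def Atom_list : List String := ["C", "N", "O", "S", "F", "Si", "P", "Cl", "Br", "Mg", "Na", "Ca", "Fe", "Al", "I",
  "B", "K", "Se", "Zn", "H", "Cu", "Mn"]

-- body of A's first loop, on the fetched element smi[j]
def aStep1core (st : Bool × List String) (x : String) : Bool × List String :=
  let flag := if x ∈ Bond_list then false else st.1
  let flag := if x ∈ Atom_list then true else flag
  if x ≠ "?" then (flag, st.2 ++ [x])
  else if flag = false then (flag, st.2 ++ ["?"]) else (flag, st.2)

-- body of A's first loop (j runs over range(len(smi)-1, -1, -1); x = smi[j])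
def aStep1 (smi : List String) (st : Bool × List String) (j : Int) : Bool × List String :=
  aStep1core st (PySem.List.pyGetD smi j "")

-- body of A's second loop
def aStep2 (st : Int × List String) (k : String) : Int × List String :=
  let acc := st.2 ++ [k]
  let n := if k ≠ "?" then (0 : Int) else st.1
  let n := if k = "?" then n + 1 else n
  if n > 0 ∧ PySem.Int.mod n 5 = 0 then
    (n, PySem.List.slice acc (some 0) (some ((acc.length : Int) - 5)) ++ ["?5"])
  else (n, acc)

def del_null (smi : List String) : List String :=
  let p := (PySem.List.pyRange ((smi.length : Int) - 1) (-1) (-1)).foldl (aStep1 smi) (true, [])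
  let tail := p.2.reverse
  let q := tail.foldl aStep2 (0, [])
  q.2

-- ===== PORT B =====
-- body of B's first loop (t runs over reversed(smi))
def bStep1 (st : Bool × List String) (t : String) : Bool × List String :=
  let flag := if t ∈ Bond_list then false else if t ∈ Atom_list then true else st.1
  if t ≠ "?" ∨ flag = false then (flag, st.2 ++ [t]) else (flag, st.2)

-- body of B's second loop: count a '?' run, flush it with divmod on a non-'?' token
def bStep2 (st : Nat × List String) (t : String) : Nat × List String :=
  if t = "?" then (st.1 + 1, st.2)
  else (0, st.2 ++ List.replicate (st.1 / 5) "?5" ++ List.replicate (st.1 % 5) "?" ++ [t])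

def bFlush (st : Nat × List String) : List String :=
  st.2 ++ List.replicate (st.1 / 5) "?5" ++ List.replicate (st.1 % 5) "?"

def del_null_alt (smi : List String) : List String :=
  let kept := smi.reverse.foldl bStep1 (true, [])
  let r := kept.2.reverse.foldl bStep2 (0, [])
  bFlush r

-- ===== PRECONDITION & SPEC =====
def Spec_del_null (smi : List String) (out : List String) : Prop := out = del_null_alt smi
instance (smi : List String) (out : List String) : Decidable (Spec_del_null smi out) := by unfold Spec_del_null; infer_instance

-- ===== CLAIM (what is proved, stated in full; the proofs are below) =====
def Claim_equal_del_null : Prop := ∀ (smi : List String), Dom_del_null smi → Spec_del_null smi (del_null smi)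

-- ===== LEMMAS AND PROOFS =====

-- the two pass-1 loop bodies agree on every state and token
lemma step1_eq (st : Bool × List String) (x : String) : aStep1core st x = bStep1 st x := by
  unfold aStep1core bStep1
  by_cases hq : x = "?"
  · subst hq
    have hb : ("?" : String) ∉ Bond_list := by decide
    have ha : ("?" : String) ∉ Atom_list := by decide
    rcases st with ⟨flag, acc⟩
    cases flag <;> simp [hb, ha]
  · by_cases hb : x ∈ Bond_list
    · have ha : x ∉ Atom_list := by
        simp only [Bond_list, List.mem_cons, List.not_mem_nil, or_false] at hb
        rcases hb with h | h | h | h <;> subst h <;> decide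
      simp [hb, ha, hq]
    · by_cases ha : x ∈ Atom_list <;> simp [hb, ha, hq]

-- A's pass 1 (index loop over range(len-1,-1,-1)) equals B's pass 1 (fold over reversed list)
lemma pass1_eq (smi : List String) :
    (PySem.List.pyRange ((smi.length : Int) - 1) (-1) (-1)).foldl (aStep1 smi) (true, []) =
      smi.reverse.foldl bStep1 (true, []) := by
  have hr : PySem.List.pyRange ((smi.length : Int) - 1) (-1) (-1) =
      (PySem.List.pyRange 0 (smi.length : Int) 1).reverse := by
    have := PySem.List.pyRange_neg_one_eq_reverse ((smi.length : Int) - 1) (-1)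
    simpa using this
  have hfun : aStep1 smi = fun st j => bStep1 st (PySem.List.pyGetD smi j "") :=
    funext fun st => funext fun j => step1_eq st (PySem.List.pyGetD smi j "")
  rw [hr, hfun, ← List.foldl_map, List.map_reverse,
    show ((PySem.List.pyRange 0 (smi.length : Int) 1).map (fun j => PySem.List.pyGetD smi j "")) = smi
      from PySem.List.map_pyGetD_pyRange_zero' smi ""]

-- pass 2 invariant: A's counter-and-slice state is B's run-length state, flushed
lemma pass2_eq (l : List String) : ∀ (r : Nat) (out : List String),
    l.foldl aStep2 ((r : Int), bFlush (r, out)) =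
      (((l.foldl bStep2 (r, out)).1 : Int), bFlush (l.foldl bStep2 (r, out))) := by
  induction l with
  | nil => intro r out; simp
  | cons t l ih =>
    intro r out
    by_cases hq : t = "?"
    · subst hq
      have hstepB : bStep2 (r, out) "?" = (r + 1, out) := by simp [bStep2]
      by_cases h5 : (r + 1) % 5 = 0
      · have hstepA : aStep2 ((r : Int), bFlush (r, out)) "?" =
            (((r + 1 : Nat) : Int), bFlush (r + 1, out)) := by
          have hmod : PySem.Int.mod ((r : Int) + 1) 5 = 0 := by
            have hc : ((r : Int) + 1) = ((r + 1 : Nat) : Int) := by push_cast; ring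
            rw [hc]
            have := PySem.Int.mod_natCast (r + 1) 5
            simp only [Nat.cast_ofNat] at this
            rw [this, h5]; simp
          have hpos : ((r : Int) + 1) > 0 := by positivity
          have hr4 : r % 5 = 4 := by omega
          have hlen : (bFlush (r, out) ++ ["?"]).length = out.length + r / 5 + 5 := by
            simp [bFlush, hr4]; omega
          have hslice : PySem.List.slice (bFlush (r, out) ++ ["?"]) (some 0)
              (some (((bFlush (r, out) ++ ["?"]).length : Int) - 5)) ++ ["?5"] = bFlush (r + 1, out) := by
            rw [PySem.List.slice_toNat _ (by omega) (by rw [hlen]; push_cast; omega)]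
            have htn : ((((bFlush (r, out) ++ ["?"]).length : Int) - 5)).toNat
                = out.length + r / 5 := by rw [hlen]; push_cast; omega
            simp only [htn, Int.toNat_zero, Nat.sub_zero, List.drop_zero]
            have hsplit : bFlush (r, out) ++ ["?"] =
                (out ++ List.replicate (r / 5) "?5") ++ List.replicate 5 "?" := by
              simp [bFlush, hr4]
            rw [hsplit]
            rw [show out.length + r / 5 = (out ++ List.replicate (r / 5) "?5").length by simp,
              List.take_left]
            have h15 : (r + 1) / 5 = r / 5 + 1 := by omega
            simp [bFlush, h15, h5, List.replicate_succ']
          unfold aStep2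
          simp only [if_neg (by trivial : ¬("?" : String) ≠ "?")]
          rw [if_pos ⟨hpos, hmod⟩]
          refine Prod.ext ?_ ?_
          · push_cast; ring
          · simpa using hslice
        rw [List.foldl_cons, hstepA, List.foldl_cons, hstepB]
        exact ih (r + 1) out
      · have hstepA : aStep2 ((r : Int), bFlush (r, out)) "?" =
            (((r + 1 : Nat) : Int), bFlush (r + 1, out)) := by
          have hmod : ¬ PySem.Int.mod ((r : Int) + 1) 5 = 0 := by
            have hc : ((r : Int) + 1) = ((r + 1 : Nat) : Int) := by push_cast; ring
            rw [hc]
            have := PySem.Int.mod_natCast (r + 1) 5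
            simp only [Nat.cast_ofNat] at this
            rw [this]
            exact_mod_cast h5
          unfold aStep2
          simp only [if_neg (by trivial : ¬("?" : String) ≠ "?")]
          rw [if_neg (by intro h; exact hmod h.2)]
          refine Prod.ext ?_ ?_
          · push_cast; ring
          · have h15 : (r + 1) / 5 = r / 5 := by omega
            have hm5 : (r + 1) % 5 = r % 5 + 1 := by omega
            simp [bFlush, h15, hm5, List.replicate_succ' (n := r % 5)]
        rw [List.foldl_cons, hstepA, List.foldl_cons, hstepB]
        exact ih (r + 1) out
    · have hstepA : aStep2 ((r : Int), bFlush (r, out)) t =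
          (((0 : Nat) : Int), bFlush (0, bFlush (r, out) ++ [t])) := by
        unfold aStep2
        simp [hq, bFlush]
      have hstepB : bStep2 (r, out) t = (0, bFlush (r, out) ++ [t]) := by
        simp [bStep2, hq, bFlush]
      rw [List.foldl_cons, hstepA, List.foldl_cons, hstepB]
      exact ih 0 (bFlush (r, out) ++ [t])

-- ===== VERDICT (by name: the statement is the Claim_ definition above) =====
theorem del_null_spec : Claim_equal_del_null := by
  intro smi _
  show del_null smi = del_null_alt smi
  have h := pass2_eq ((smi.reverse.foldl bStep1 (true, [])).2.reverse) 0 []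
  rw [show bFlush (0, []) = ([] : List String) by simp [bFlush]] at h
  rw [show ((0 : Nat) : Int) = (0 : Int) by norm_num] at h
  simp only [del_null, del_null_alt]
  rw [pass1_eq, h]
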